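-- pv_equiv track=rewrite | github.com/metodj/Project-Euler | euler45.py | euler45_alternativno
-- ===== SOURCE A (Python) =====
-- def euler45_alternativno(pen, hex):
--     indeks_p, indeks_h = 0, 0
--     p = pen[indeks_p]
--     h = hex[indeks_h]
--     while True:
--         while p < h:
--             indeks_p += 1
--             p = pen[indeks_p]
--         if h == p and (h != 40755):
--             return p
--         indeks_h += 1
--         h = hex[indeks_h]
--     return 'zvisaj mejo'
-- ===== SOURCE B (Python) =====
-- def euler45_alternativno(pen, hex):
--     penset = set(pen)
--     i = 0
--     while True:
--         h = hex[i]
--         if h in penset and h != 40755: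
--             return h
--         i += 1
-- ===== Notes on version B (the rewrite author's own statement) =====
-- stated objective: idiomatic
-- what changed: Replaced the two-pointer merge over the two sorted lists with a single indexed scan over hex testing membership in a hash set built once from pen.
-- outside the precondition, e.g. on euler45_alternativno([5, 1], [1, 5]): A returns 5, B returns 1
import Mathlib
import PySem

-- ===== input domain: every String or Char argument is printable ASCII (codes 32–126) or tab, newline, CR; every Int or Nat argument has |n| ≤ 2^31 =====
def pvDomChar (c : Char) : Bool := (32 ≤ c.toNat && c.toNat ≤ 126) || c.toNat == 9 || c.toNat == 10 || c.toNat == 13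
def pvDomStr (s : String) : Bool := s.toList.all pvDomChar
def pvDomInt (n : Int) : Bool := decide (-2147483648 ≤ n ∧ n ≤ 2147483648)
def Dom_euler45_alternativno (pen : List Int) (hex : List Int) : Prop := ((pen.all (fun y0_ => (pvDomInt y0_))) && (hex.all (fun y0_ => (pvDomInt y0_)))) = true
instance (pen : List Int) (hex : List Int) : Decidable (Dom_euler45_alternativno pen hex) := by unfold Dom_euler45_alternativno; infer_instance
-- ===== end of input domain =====

-- B replaces A's two-pointer merge over the two sorted lists by a single indexed scan over
-- hex testing membership in a set built once from pen (same cost, more idiomatic).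

-- ===== PORT A =====
-- A's `while True` state machine over the two indices; the out-of-range branches (0) are
-- where Python raises IndexError, excluded by Pre_.
def eulerALoop (pen : List Int) (hex : List Int) (ip ih : Nat) : Int :=
  if hp : ip < pen.length then
    if hh : ih < hex.length then
      let p := pen[ip]
      let h := hex[ih]
      if p < h then eulerALoop pen hex (ip + 1) ih
      else if h = p ∧ h ≠ 40755 then p
      else eulerALoop pen hex ip (ih + 1)
    else 0
  else 0
termination_by (pen.length - ip) + (hex.length - ih)
decreasing_by
  · omega
  · omega

def euler45_alternativno (pen : List Int) (hex : List Int) : Int :=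
  eulerALoop pen hex 0 0

-- ===== PORT B =====
-- indexed `while True` scan of hex against the set of pen; out-of-range branch (0) = IndexError
def eulerBLoop (penset : PySem.Set Int) (hex : List Int) (i : Nat) : Int :=
  if hh : i < hex.length then
    let h := hex[i]
    if PySem.Set.contains penset h ∧ h ≠ 40755 then h
    else eulerBLoop penset hex (i + 1)
  else 0
termination_by hex.length - i

def euler45_alternativno_alt (pen : List Int) (hex : List Int) : Int :=
  eulerBLoop (PySem.Set.ofList pen) hex 0

-- ===== PRECONDITION & SPEC =====
-- Pre_ covers the natural domain — nondecreasing number sequences with a common element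
-- ≠ 40755 (without one A raises IndexError) — plus the inputs on which A's answer falls at the
-- very first hex element (the first pen element ≥ hex[0] equals hex[0] ≠ 40755); outside it,
-- on unsorted lists, A's merge pointer can skip elements and its value is a pointer artefact.
def Pre_euler45_alternativno (pen : List Int) (hex : List Int) : Prop :=
  (pen.Pairwise (· ≤ ·) ∧ hex.Pairwise (· ≤ ·) ∧ ∃ x ∈ hex, x ∈ pen ∧ x ≠ 40755)
  ∨ (hex ≠ [] ∧ hex.headD 0 ≠ 40755 ∧
      pen.find? (fun p => decide (hex.headD 0 ≤ p)) = some (hex.headD 0))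
instance (pen : List Int) (hex : List Int) : Decidable (Pre_euler45_alternativno pen hex) := by
  unfold Pre_euler45_alternativno; infer_instance

def pvWitness_euler45_alternativno : List Int × List Int := ([1, 5], [2, 5])

def Spec_euler45_alternativno (pen : List Int) (hex : List Int) (out : Int) : Prop := out = euler45_alternativno_alt pen hex
instance (pen : List Int) (hex : List Int) (out : Int) : Decidable (Spec_euler45_alternativno pen hex out) := by unfold Spec_euler45_alternativno; infer_instance

-- ===== CLAIM (what is proved, stated in full; the proofs are below) =====
def Claim_equal_euler45_alternativno : Prop := ∀ (pen : List Int) (hex : List Int), Dom_euler45_alternativno pen hex → Pre_euler45_alternativno pen hex → Spec_euler45_alternativno pen hex (euler45_alternativno pen hex)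

-- ===== LEMMAS AND PROOFS =====

lemma pv_witness_ok :
    Dom_euler45_alternativno pvWitness_euler45_alternativno.1 pvWitness_euler45_alternativno.2 ∧
    Pre_euler45_alternativno pvWitness_euler45_alternativno.1 pvWitness_euler45_alternativno.2 := by
  decide

lemma loop_eq (pen hex : List Int) (ip ih : Nat)
    (hpen : ∀ i j (hi : i < pen.length) (hj : j < pen.length), i < j → pen[i] ≤ pen[j])
    (hhex : ∀ i j (hi : i < hex.length) (hj : j < hex.length), i < j → hex[i] ≤ hex[j])
    (hinv : ∀ j (hj : j < pen.length), j < ip → ∀ (hh : ih < hex.length), pen[j] < hex[ih])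
    (hex_ex : ∃ k, ∃ (hk : k < hex.length), ih ≤ k ∧ hex[k] ∈ pen ∧ hex[k] ≠ 40755) :
    eulerALoop pen hex ip ih = eulerBLoop (PySem.Set.ofList pen) hex ih := by
  obtain ⟨k, hk, hik, hkpen, hk4⟩ := hex_ex
  have hih : ih < hex.length := lt_of_le_of_lt hik hk
  have hhk : hex[ih] ≤ hex[k] := by
    rcases lt_or_eq_of_le hik with h | h
    · exact hhex ih k hih hk h
    · subst h; exact le_refl _
  obtain ⟨m, hm, hmx⟩ := List.mem_iff_getElem.mp hkpen
  have him : ip ≤ m := by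
    by_contra hcon
    push Not at hcon
    have h1 := hinv m hm hcon hih
    rw [hmx] at h1
    omega
  have hip : ip < pen.length := lt_of_le_of_lt him hm
  rw [eulerALoop, dif_pos hip, dif_pos hih]
  by_cases hcmp : pen[ip] < hex[ih]
  · rw [if_pos hcmp]
    exact loop_eq pen hex (ip + 1) ih hpen hhex
      (by
        intro j hj hjlt hh
        rcases Nat.lt_or_ge j ip with h | h
        · exact hinv j hj h hh
        · have : j = ip := by omega
          subst this; exact hcmp)
      ⟨k, hk, hik, hkpen, hk4⟩
  · rw [if_neg hcmp]
    by_cases heq : hex[ih] = pen[ip] ∧ hex[ih] ≠ 40755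
    · rw [if_pos heq]
      rw [eulerBLoop, dif_pos hih]
      have hmem : hex[ih] ∈ pen := heq.1 ▸ List.getElem_mem hip
      have : PySem.Set.contains (PySem.Set.ofList pen) hex[ih] ∧ hex[ih] ≠ 40755 := by
        refine ⟨?_, heq.2⟩
        simp [PySem.Set.contains, PySem.Set.mem_ofList, hmem]
      rw [if_pos this]
      exact heq.1.symm
    · rw [if_neg heq]
      -- hex[ih] does not qualify: either not in pen or equal to 40755
      have hnq : ¬ (hex[ih] ∈ pen ∧ hex[ih] ≠ 40755) := by
        rintro ⟨hmem, h4⟩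
        obtain ⟨m', hm', hmx'⟩ := List.mem_iff_getElem.mp hmem
        rcases Nat.lt_or_ge m' ip with h | h
        · have := hinv m' hm' h hih
          rw [hmx'] at this; omega
        · have hle : pen[ip] ≤ pen[m'] := by
            rcases lt_or_eq_of_le h with h' | h'
            · exact hpen ip m' hip hm' h'
            · subst h'; exact le_refl _
          rw [hmx'] at hle
          have : hex[ih] = pen[ip] := le_antisymm (by omega) hle
          exact heq ⟨this, h4⟩
      have hBstep : eulerBLoop (PySem.Set.ofList pen) hex ih
          = eulerBLoop (PySem.Set.ofList pen) hex (ih + 1) := by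
        rw [eulerBLoop, dif_pos hih]
        have : ¬ (PySem.Set.contains (PySem.Set.ofList pen) hex[ih] ∧ hex[ih] ≠ 40755) := by
          rintro ⟨hc, h4⟩
          exact hnq ⟨by simpa [PySem.Set.contains, PySem.Set.mem_ofList] using hc, h4⟩
        rw [if_neg this]
      rw [hBstep]
      have hkne : ih < k := by
        rcases lt_or_eq_of_le hik with h | h
        · exact h
        · exfalso; subst h; exact hnq ⟨hkpen, hk4⟩
      exact loop_eq pen hex ip (ih + 1) hpen hhex
        (by
          intro j hj hjlt hh
          have h1 := hinv j hj hjlt hih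
          have h2 : hex[ih] ≤ hex[ih + 1] := hhex ih (ih + 1) hih hh (by omega)
          omega)
        ⟨k, hk, by omega, hkpen, hk4⟩
termination_by (pen.length - ip) + (hex.length - ih)
decreasing_by
  · omega
  · omega

lemma walkA (pen hex : List Int) (ip : Nat) (h0 : Int)
    (hh : 0 < hex.length) (hx0 : hex[0] = h0) (h4 : h0 ≠ 40755)
    (hfind : (pen.drop ip).find? (fun p => decide (h0 ≤ p)) = some h0) :
    eulerALoop pen hex ip 0 = h0 := by
  by_cases hip : ip < pen.length
  · rw [eulerALoop, dif_pos hip, dif_pos hh]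
    rw [show pen.drop ip = pen[ip] :: pen.drop (ip + 1) from (List.getElem_cons_drop hip).symm] at hfind
    by_cases hle : h0 ≤ pen[ip]
    · rw [List.find?_cons_of_pos (h := by simpa using hle)] at hfind
      have hpe : pen[ip] = h0 := by injection hfind
      have hnlt : ¬ pen[ip] < hex[0] := by rw [hpe, hx0]; omega
      rw [if_neg hnlt, if_pos ⟨by rw [hpe, hx0], by rw [hx0]; exact h4⟩, hpe]
    · rw [List.find?_cons_of_neg (h := by simpa using hle)] at hfind
      have hlt : pen[ip] < hex[0] := by rw [hx0]; omega
      rw [if_pos hlt]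
      exact walkA pen hex (ip + 1) h0 hh hx0 h4 hfind
  · rw [List.drop_eq_nil_of_le (by omega)] at hfind
    simp at hfind
termination_by pen.length - ip

-- ===== VERDICT (by name: the statement is the Claim_ definition above) =====
theorem euler45_alternativno_spec : Claim_equal_euler45_alternativno := by
  intro pen hex _ hpre
  rcases hpre with ⟨hpen, hhex, x, hxhex, hxpen, hx4⟩ | ⟨hne, h4, hfind⟩
  case inr =>
    cases hex with
    | nil => exact absurd rfl hne
    | cons a t =>
      simp only [List.headD_cons] at h4 hfind
      have hmem : a ∈ pen := List.mem_of_find?_eq_some hfind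
      unfold Spec_euler45_alternativno euler45_alternativno euler45_alternativno_alt
      have hB : eulerBLoop (PySem.Set.ofList pen) (a :: t) 0 = a := by
        rw [eulerBLoop, dif_pos (by simp)]
        rw [if_pos ⟨by simp [PySem.Set.contains, PySem.Set.mem_ofList, hmem], h4⟩]
        simp
      rw [hB]
      exact walkA pen (a :: t) 0 a (by simp) rfl h4 (by simpa using hfind)
  unfold Spec_euler45_alternativno euler45_alternativno euler45_alternativno_alt
  obtain ⟨k, hk, hxk⟩ := List.mem_iff_getElem.mp hxhex
  exact loop_eq pen hex 0 0
    (fun i j hi hj hij => List.pairwise_iff_getElem.mp hpen i j hi hj hij)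
    (fun i j hi hj hij => List.pairwise_iff_getElem.mp hhex i j hi hj hij)
    (by intro j hj hjlt hh; omega)
    ⟨k, hk, Nat.zero_le _, hxk ▸ hxpen, hxk ▸ hx4⟩
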